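-- pv_equiv track=rewrite | github.com/TTinTonT/SFC_View | sfis_tool/repair_flow.py | build_r_only_targets
-- ===== SOURCE A (Python) =====
-- def build_r_only_targets(base, route_groups):
--     """Build R_xxx target options for repair_r_only mode."""
--     out = []
--     if not base:
--         return out
--     seen = set()
--     for target in [base, "FLA"]:
--         if target and target not in seen:
--             out.append({"from": f"R_{base}", "to": target})
--             seen.add(target)
--     for g in route_groups or []:
--         gg = (g or "").strip().upper()
--         if gg and gg not in seen and gg in (base, "FLA"):
--             out.append({"from": f"R_{base}", "to": gg})
--             seen.add(gg)
--     return out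
-- ===== SOURCE B (Python) =====
-- def build_r_only_targets(base, route_groups):
--     """Build R_xxx target options for repair_r_only mode.
--
--     The route_groups loop in the original can never add anything (every
--     candidate it could accept is already emitted by the first pass), so we
--     build the target list directly; route_groups is accepted and ignored.
--     """
--     if not base:
--         return []
--     targets = [base] if base == "FLA" else [base, "FLA"]
--     return [{"from": f"R_{base}", "to": t} for t in targets]
-- ===== Notes on version B (the rewrite author's own statement) =====
-- stated objective: simpler
-- what changed: B drops A's seen-set bookkeeping and the dead route_groups loop (which can never add an entry, since every candidate it accepts is already seeded) and builds the one- or two-element target list directly from base.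
import Mathlib
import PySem

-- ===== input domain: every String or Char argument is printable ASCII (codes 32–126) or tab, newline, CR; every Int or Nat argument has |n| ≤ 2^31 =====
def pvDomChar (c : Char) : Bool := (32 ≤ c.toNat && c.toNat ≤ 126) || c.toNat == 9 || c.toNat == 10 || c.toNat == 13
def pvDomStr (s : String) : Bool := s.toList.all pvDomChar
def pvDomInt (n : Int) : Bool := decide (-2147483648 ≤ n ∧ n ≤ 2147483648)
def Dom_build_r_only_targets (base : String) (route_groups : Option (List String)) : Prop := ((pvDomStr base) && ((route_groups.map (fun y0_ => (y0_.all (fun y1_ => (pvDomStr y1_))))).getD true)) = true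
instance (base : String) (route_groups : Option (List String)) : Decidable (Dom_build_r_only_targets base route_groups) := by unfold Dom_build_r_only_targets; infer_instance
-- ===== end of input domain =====

-- B: drop A's seen-set and its route_groups loop (which never adds an entry) and build the
-- one- or two-element target list directly from base; route_groups is accepted and ignored.

-- ===== PORT A =====
def build_r_only_targets (base : String) (route_groups : Option (List String)) : List (List (String × String)) :=
  if base = "" then []
  else
    -- for target in [base, "FLA"]: …
    let st1 : List (List (String × String)) × PySem.Set String :=
      [base, "FLA"].foldl (fun (st : List (List (String × String)) × PySem.Set String) target =>
        if target ≠ "" ∧ ¬ PySem.Set.contains st.2 target then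
          (st.1 ++ [[("from", "R_" ++ base), ("to", target)]], PySem.Set.add st.2 target)
        else st) ([], PySem.Set.empty)
    -- for g in route_groups or []: …
    let st2 : List (List (String × String)) × PySem.Set String :=
      (route_groups.getD []).foldl (fun (st : List (List (String × String)) × PySem.Set String) g =>
        let gg := PySem.Str.upper (PySem.Str.strip g)
        if gg ≠ "" ∧ ¬ PySem.Set.contains st.2 gg ∧ (gg = base ∨ gg = "FLA") then
          (st.1 ++ [[("from", "R_" ++ base), ("to", gg)]], PySem.Set.add st.2 gg)
        else st) st1
    st2.1

-- ===== PORT B =====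
def build_r_only_targets_alt (base : String) (route_groups : Option (List String)) : List (List (String × String)) :=
  if base = "" then []
  else
    (if base = "FLA" then [base] else [base, "FLA"]).map
      (fun t => [("from", "R_" ++ base), ("to", t)])

-- ===== PRECONDITION & SPEC =====
def Spec_build_r_only_targets (base : String) (route_groups : Option (List String)) (out : List (List (String × String))) : Prop := out = build_r_only_targets_alt base route_groups
instance (base : String) (route_groups : Option (List String)) (out : List (List (String × String))) : Decidable (Spec_build_r_only_targets base route_groups out) := by unfold Spec_build_r_only_targets; infer_instance

-- ===== CLAIM (what is proved, stated in full; the proofs are below) =====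
def Claim_equal_build_r_only_targets : Prop := ∀ (base : String) (route_groups : Option (List String)), Dom_build_r_only_targets base route_groups → Spec_build_r_only_targets base route_groups (build_r_only_targets base route_groups)

-- ===== LEMMAS AND PROOFS =====

-- The second loop of A is a no-op once `base` and "FLA" are both in `seen`.
theorem second_loop_id (base : String) (l : List String)
    (st : List (List (String × String)) × PySem.Set String)
    (hb : base ∈ st.2) (hf : "FLA" ∈ st.2) :
    l.foldl (fun (st : List (List (String × String)) × PySem.Set String) g =>
        let gg := PySem.Str.upper (PySem.Str.strip g)
        if gg ≠ "" ∧ ¬ PySem.Set.contains st.2 gg ∧ (gg = base ∨ gg = "FLA") then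
          (st.1 ++ [[("from", "R_" ++ base), ("to", gg)]], PySem.Set.add st.2 gg)
        else st) st = st := by
  induction l with
  | nil => rfl
  | cons g t ih =>
    simp only [List.foldl_cons]
    have hstep :
        (if PySem.Str.upper (PySem.Str.strip g) ≠ "" ∧
            ¬ PySem.Set.contains st.2 (PySem.Str.upper (PySem.Str.strip g)) ∧
            (PySem.Str.upper (PySem.Str.strip g) = base ∨ PySem.Str.upper (PySem.Str.strip g) = "FLA") then
          (st.1 ++ [[("from", "R_" ++ base), ("to", PySem.Str.upper (PySem.Str.strip g))]],
            PySem.Set.add st.2 (PySem.Str.upper (PySem.Str.strip g)))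
        else st) = st := by
      rw [if_neg]
      rintro ⟨-, hnot, hor⟩
      rcases hor with h | h <;> rw [h] at hnot <;> simp at hnot <;>
        [exact hnot hb; exact hnot hf]
    rw [hstep]
    exact ih

-- ===== VERDICT (by name: the statement is the Claim_ definition above) =====
theorem build_r_only_targets_spec : Claim_equal_build_r_only_targets := by
  intro base route_groups _
  unfold Spec_build_r_only_targets build_r_only_targets build_r_only_targets_alt
  by_cases hb : base = ""
  · simp [hb]
  · simp only [if_neg hb]
    by_cases hfla : base = "FLA"
    · subst hfla
      have h1 : (["FLA", "FLA"].foldl (fun (st : List (List (String × String)) × PySem.Set String) target =>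
          if target ≠ "" ∧ ¬ PySem.Set.contains st.2 target then
            (st.1 ++ [[("from", "R_" ++ "FLA"), ("to", target)]], PySem.Set.add st.2 target)
          else st) ([], PySem.Set.empty))
          = ([[("from", "R_FLA"), ("to", "FLA")]], ["FLA"]) := by decide
      rw [h1, second_loop_id _ _ _ (by decide) (by decide)]
      decide
    · have hne : ("FLA" : String) ≠ base := fun h => hfla h.symm
      have h1 : ([base, "FLA"].foldl (fun (st : List (List (String × String)) × PySem.Set String) target =>
          if target ≠ "" ∧ ¬ PySem.Set.contains st.2 target then
            (st.1 ++ [[("from", "R_" ++ base), ("to", target)]], PySem.Set.add st.2 target)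
          else st) ([], PySem.Set.empty))
          = ([[("from", "R_" ++ base), ("to", base)], [("from", "R_" ++ base), ("to", "FLA")]],
             [base, "FLA"]) := by
        simp [List.foldl, PySem.Set.empty, PySem.Set.add, PySem.Set.contains, hb, hne]
      rw [h1, second_loop_id _ _ _ (by simp) (by simp)]
      simp [hfla]
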